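-- pv_equiv track=rewrite | github.com/ayoubzulfiqar/Leetcode-Medium | ProjectEmployeesIII/project_employees_iii.py | get_most_experienced_project_employees
-- ===== SOURCE A (Python) =====
-- def get_most_experienced_project_employees(employees_data, project_employee_data):
--     employee_experience_map = {emp[0]: emp[2] for emp in employees_data}
--
--     project_employees = {}
--     for project_id, employee_id in project_employee_data:
--         if project_id not in project_employees:
--             project_employees[project_id] = []
--         project_employees[project_id].append(employee_id)
--
--     results = []
--     for project_id, assigned_employee_ids in project_employees.items():
--         max_experience_for_project = -1
--
--         for emp_id in assigned_employee_ids: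
--             if emp_id in employee_experience_map:
--                 max_experience_for_project = max(max_experience_for_project, employee_experience_map[emp_id])
--
--         if max_experience_for_project != -1:
--             for emp_id in assigned_employee_ids:
--                 if emp_id in employee_experience_map and employee_experience_map[emp_id] == max_experience_for_project:
--                     results.append({'project_id': project_id, 'employee_id': emp_id})
--
--     return results
-- ===== SOURCE B (Python) =====
-- def get_most_experienced_project_employees(employees_data, project_employee_data):
--     experience = {}
--     for emp in employees_data:
--         experience[emp[0]] = emp[2]
--
--     # project_id -> (running max experience, candidate employee ids at that max)
--     best = {}
--     for project_id, employee_id in project_employee_data: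
--         if project_id not in best:
--             best[project_id] = (-1, [])
--         e = experience.get(employee_id)
--         if e is None:
--             continue
--         max_exp, candidates = best[project_id]
--         if e > max_exp:
--             best[project_id] = (e, [employee_id])
--         elif e == max_exp:
--             candidates.append(employee_id)
--
--     results = []
--     for project_id, (max_exp, candidates) in best.items():
--         if max_exp != -1:
--             for employee_id in candidates:
--                 results.append({'project_id': project_id, 'employee_id': employee_id})
--     return results
-- ===== Notes on version B (the rewrite author's own statement) =====
-- stated objective: alternative
-- what changed: Instead of grouping employee ids per project and then running two inner passes (max, then filter), B maintains per project a running (max experience, candidate list) pair updated incrementally in a single pass over the assignments, then just emits the stored candidates.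
import Mathlib
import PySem

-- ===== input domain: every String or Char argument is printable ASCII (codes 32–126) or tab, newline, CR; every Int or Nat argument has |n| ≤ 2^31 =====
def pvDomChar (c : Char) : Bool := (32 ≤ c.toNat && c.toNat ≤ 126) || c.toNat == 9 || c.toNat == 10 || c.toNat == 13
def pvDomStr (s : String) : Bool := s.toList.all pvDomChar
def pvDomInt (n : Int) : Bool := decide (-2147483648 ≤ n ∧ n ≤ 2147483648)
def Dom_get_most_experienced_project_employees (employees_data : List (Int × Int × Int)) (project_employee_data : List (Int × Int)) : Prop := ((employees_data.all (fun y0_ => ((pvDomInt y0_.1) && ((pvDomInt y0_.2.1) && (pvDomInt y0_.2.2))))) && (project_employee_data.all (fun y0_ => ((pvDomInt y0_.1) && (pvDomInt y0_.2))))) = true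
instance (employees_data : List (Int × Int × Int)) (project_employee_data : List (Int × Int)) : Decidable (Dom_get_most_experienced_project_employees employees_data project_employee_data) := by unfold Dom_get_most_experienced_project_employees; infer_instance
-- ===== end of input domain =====

-- B replaces A's group-then-(max-pass + filter-pass) per project by a single incremental pass that
-- maintains, per project, a running maximum and the candidate list at that maximum (alternative decomposition).


-- ===== PORT A =====
def get_most_experienced_project_employees (employees_data : List (Int × Int × Int)) (project_employee_data : List (Int × Int)) : List (List (String × Int)) :=
  let employee_experience_map : PySem.Dict Int Int :=
    employees_data.foldl (fun d emp => d.insert emp.1 emp.2.2) PySem.Dict.empty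
  let project_employees : PySem.Dict Int (List Int) :=
    project_employee_data.foldl (fun d pe =>
      let d := if d.contains pe.1 then d else d.insert pe.1 []
      d.modify pe.1 [] (fun l => l ++ [pe.2])) PySem.Dict.empty
  project_employees.items.foldl (fun results item =>
    let max_experience_for_project : Int :=
      item.2.foldl (fun m eid =>
        match employee_experience_map.get? eid with
        | some e => max m e
        | none => m) (-1)
    if max_experience_for_project ≠ -1 then
      item.2.foldl (fun r eid =>
        match employee_experience_map.get? eid with
        | some e => if e = max_experience_for_project then r ++ [[("project_id", item.1), ("employee_id", eid)]] else r
        | none => r) results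
    else results) []

-- ===== PORT B =====
def get_most_experienced_project_employees_alt (employees_data : List (Int × Int × Int)) (project_employee_data : List (Int × Int)) : List (List (String × Int)) :=
  let experience : PySem.Dict Int Int :=
    employees_data.foldl (fun d emp => d.insert emp.1 emp.2.2) PySem.Dict.empty
  let best : PySem.Dict Int (Int × List Int) :=
    project_employee_data.foldl (fun d pe =>
      let d := if d.contains pe.1 then d else d.insert pe.1 (-1, [])
      match experience.get? pe.2 with
      | none => d
      | some e =>
        let mc := d.getD pe.1 (-1, [])
        if e > mc.1 then d.insert pe.1 (e, [pe.2])
        else if e = mc.1 then d.modify pe.1 (-1, []) (fun q => (q.1, q.2 ++ [pe.2]))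
        else d) PySem.Dict.empty
  best.items.foldl (fun results item =>
    if item.2.1 ≠ -1 then
      item.2.2.foldl (fun r eid => r ++ [[("project_id", item.1), ("employee_id", eid)]]) results
    else results) []

-- ===== PRECONDITION & SPEC =====
def Spec_get_most_experienced_project_employees (employees_data : List (Int × Int × Int)) (project_employee_data : List (Int × Int)) (out : List (List (String × Int))) : Prop := out = get_most_experienced_project_employees_alt employees_data project_employee_data
instance (employees_data : List (Int × Int × Int)) (project_employee_data : List (Int × Int)) (out : List (List (String × Int))) : Decidable (Spec_get_most_experienced_project_employees employees_data project_employee_data out) := by unfold Spec_get_most_experienced_project_employees; infer_instance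

-- ===== CLAIM (what is proved, stated in full; the proofs are below) =====
def Claim_equal_get_most_experienced_project_employees : Prop := ∀ (employees_data : List (Int × Int × Int)) (project_employee_data : List (Int × Int)), Dom_get_most_experienced_project_employees employees_data project_employee_data → Spec_get_most_experienced_project_employees employees_data project_employee_data (get_most_experienced_project_employees employees_data project_employee_data)

-- ===== LEMMAS AND PROOFS =====

-- max experience A computes over a project's assigned-employee list
def pvM (em : PySem.Dict Int Int) (l : List Int) : Int :=
  l.foldl (fun m eid =>
    match em.get? eid with
    | some e => max m e
    | none => m) (-1)

-- "this employee is in the map with experience v"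
def pvValEq (em : PySem.Dict Int Int) (v : Int) (eid : Int) : Bool :=
  match em.get? eid with
  | some e => decide (e = v)
  | none => false

-- the (max, candidates) pair B maintains, as a function of A's grouped list
def pvF (em : PySem.Dict Int Int) (l : List Int) : Int × List Int :=
  (pvM em l, l.filter (pvValEq em (pvM em l)))

lemma pvM_append (em : PySem.Dict Int Int) (l : List Int) (x : Int) :
    pvM em (l ++ [x]) =
      match em.get? x with
      | some e => max (pvM em l) e
      | none => pvM em l := by
  simp [pvM, List.foldl_append]

lemma pvM_le_append (em : PySem.Dict Int Int) (l : List Int) (x : Int) :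
    pvM em l ≤ pvM em (l ++ [x]) := by
  rw [pvM_append]
  cases em.get? x <;> simp

lemma le_pvM (em : PySem.Dict Int Int) (l : List Int) :
    ∀ x ∈ l, ∀ e, em.get? x = some e → e ≤ pvM em l := by
  induction l using List.reverseRecOn with
  | nil => simp
  | append_singleton l y ih =>
    intro x hx e he
    rcases List.mem_append.1 hx with h | h
    · exact le_trans (ih x h e he) (pvM_le_append em l y)
    · simp at h; subst h
      rw [pvM_append, he]
      exact le_max_right _ _

lemma pvF_append (em : PySem.Dict Int Int) (l : List Int) (x : Int) :
    pvF em (l ++ [x]) =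
      match em.get? x with
      | none => pvF em l
      | some e =>
        if e > (pvF em l).1 then (e, [x])
        else if e = (pvF em l).1 then ((pvF em l).1, (pvF em l).2 ++ [x])
        else pvF em l := by
  cases he : em.get? x with
  | none =>
    simp only [pvF, pvM_append, he, List.filter_append, List.filter_cons, List.filter_nil]
    simp [pvValEq, he]
  | some e =>
    by_cases hgt : e > pvM em l
    · have hmax : max (pvM em l) e = e := max_eq_right (le_of_lt hgt)
      have hnil : l.filter (pvValEq em e) = [] := by
        rw [List.filter_eq_nil_iff]
        intro y hy
        cases hy' : em.get? y with
        | none => simp [pvValEq, hy']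
        | some v =>
          simp only [pvValEq, hy', decide_eq_true_eq]
          intro hv; subst hv
          exact absurd (le_pvM em l y hy v hy') (not_le.2 hgt)
      simp only [pvF, pvM_append, he, hmax]
      simp [hgt, hnil, List.filter_append, pvValEq, he]
    · have hmax : max (pvM em l) e = pvM em l := max_eq_left (not_lt.1 hgt)
      by_cases heq : e = pvM em l
      · simp only [pvF, pvM_append, he, hmax]
        simp [heq, List.filter_append, pvValEq, he]
      · simp only [pvF, pvM_append, he, hmax]
        simp [hgt, heq, List.filter_append, pvValEq, he]

-- the value-transformer relating A's grouping dict to B's best dict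
def pvG (em : PySem.Dict Int Int) : Int × List Int -> Int × (Int × List Int) :=
  fun kv => (kv.1, pvF em kv.2)

lemma keys_of_rel (em : PySem.Dict Int Int) (dA : PySem.Dict Int (List Int)) (dB : PySem.Dict Int (Int × List Int))
    (h : dB.items = dA.items.map (pvG em)) : dB.keys = dA.keys := by
  simp only [PySem.Dict.keys, h, List.map_map]
  rfl

lemma contains_of_rel (em : PySem.Dict Int Int) (dA : PySem.Dict Int (List Int)) (dB : PySem.Dict Int (Int × List Int))
    (h : dB.items = dA.items.map (pvG em)) (k : Int) : dB.contains k = dA.contains k := by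
  rw [PySem.Dict.contains_eq_decide_mem_keys, PySem.Dict.contains_eq_decide_mem_keys, keys_of_rel em dA dB h]

-- one step of the two grouping loops preserves the relation
lemma step_rel (em : PySem.Dict Int Int) (dA : PySem.Dict Int (List Int)) (dB : PySem.Dict Int (Int × List Int))
    (hnd : dA.keys.Nodup) (h : dB.items = dA.items.map (pvG em)) (p eid : Int) :
    ((match em.get? eid with
      | none => (if dB.contains p then dB else dB.insert p (-1, []))
      | some e =>
        let d := if dB.contains p then dB else dB.insert p (-1, [])
        let mc := d.getD p (-1, [])
        if e > mc.1 then d.insert p (e, [eid])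
        else if e = mc.1 then d.modify p (-1, []) (fun q => (q.1, q.2 ++ [eid]))
        else d)).items
    = (((if dA.contains p then dA else dA.insert p []).modify p [] (fun l => l ++ [eid]))).items.map (pvG em) := by
  have hndB : dB.keys.Nodup := by rw [keys_of_rel em dA dB h]; exact hnd
  have hc := contains_of_rel em dA dB h p
  by_cases hcp : dA.contains p = true
  · -- key already present: both sides update the entry at p in place
    have hcpB : dB.contains p = true := by rw [hc]; exact hcp
    -- the unique entry of dA at key p
    have huniq : ∀ q ∈ dA.items, q.1 = p → q.2 = dA.getD p [] := by
      intro q hq hq1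
      have : dA.getD q.1 [] = q.2 := PySem.Dict.getD_of_mem_items dA (by exact hq) hnd []
      rw [hq1] at this; exact this.symm
    have hmc : dB.getD p (-1, []) = pvF em (dA.getD p []) := by
      have hpk : p ∈ dA.keys := (PySem.Dict.contains_iff_mem_keys dA p).1 hcp
      have hex : ∃ l, (p, l) ∈ dA.items := by
        simp only [PySem.Dict.keys] at hpk
        rcases List.mem_map.1 hpk with ⟨⟨k, l⟩, hq, hk⟩
        simp only at hk
        subst hk
        exact ⟨l, hq⟩
      rcases hex with ⟨l, hl⟩
      have hlv : l = dA.getD p [] := (PySem.Dict.getD_of_mem_items dA hl hnd []).symm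
      have hB : (p, pvF em l) ∈ dB.items := by
        rw [h]; exact List.mem_map.2 ⟨(p, l), hl, rfl⟩
      have := PySem.Dict.getD_of_mem_items dB hB hndB (-1, [])
      rw [this, hlv]
    simp only [hcp, hcpB, if_true, PySem.Dict.modify]
    have hAitems := PySem.Dict.items_insert_of_contains dA ((dA.getD p []) ++ [eid]) hcp
    -- helper for in-place map updates on the B side
    have hmapAB : ∀ (v : Int × List Int) (hv : v = pvF em (dA.getD p [] ++ [eid])),
        (dB.insert p v).items
          = ((dA.insert p ((dA.getD p []) ++ [eid])).items).map (pvG em) := by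
      intro v hv
      rw [PySem.Dict.items_insert_of_contains dB v hcpB, hAitems, h, List.map_map, List.map_map]
      apply List.map_congr_left
      intro q hq
      by_cases hqp : q.1 = p
      · have h2 := huniq q hq hqp
        simp [Function.comp, pvG, hqp, hv, h2]
      · simp [Function.comp, pvG, hqp]
    cases he : em.get? eid with
    | none =>
      rw [hAitems, h, List.map_map]
      apply List.map_congr_left
      intro q hq
      by_cases hqp : q.1 = p
      · have h2 := huniq q hq hqp
        have : pvF em (dA.getD p [] ++ [eid]) = pvF em (dA.getD p []) := by
          rw [pvF_append, he]
        simp [Function.comp, pvG, hqp, h2, this]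
      · simp [Function.comp, pvG, hqp]
    | some e =>
      simp only [hmc]
      by_cases hgt : e > (pvF em (dA.getD p [])).1
      · rw [if_pos hgt]
        apply hmapAB
        rw [pvF_append, he]
        simp [hgt]
      · by_cases heq : e = (pvF em (dA.getD p [])).1
        · rw [if_neg hgt, if_pos heq]
          apply hmapAB
          rw [pvF_append, he]
          simp [heq]
        · rw [if_neg hgt, if_neg heq]
          rw [hAitems, h, List.map_map]
          apply List.map_congr_left
          intro q hq
          by_cases hqp : q.1 = p
          · have h2 := huniq q hq hqp
            have : pvF em (dA.getD p [] ++ [eid]) = pvF em (dA.getD p []) := by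
              rw [pvF_append, he]; simp [hgt, heq]
            simp [Function.comp, pvG, hqp, h2, this]
          · simp [Function.comp, pvG, hqp]
  · -- fresh key: both sides append a new entry at p
    have hcp' : dA.contains p = false := by simpa using hcp
    have hcpB : dB.contains p = false := by rw [hc]; exact hcp'
    have hAins := PySem.Dict.items_insert_of_not_contains dA ([] : List Int) hcp'
    have hBins := PySem.Dict.items_insert_of_not_contains dB ((-1 : Int), ([] : List Int)) hcpB
    have hcA1 : (dA.insert p ([] : List Int)).contains p = true := PySem.Dict.contains_insert_self dA p []
    have hcB1 : (dB.insert p ((-1 : Int), ([] : List Int))).contains p = true := PySem.Dict.contains_insert_self dB p (-1, [])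
    have hgA1 : (dA.insert p ([] : List Int)).getD p [] = [] := PySem.Dict.getD_insert_self dA p [] []
    have hgB1 : (dB.insert p ((-1 : Int), ([] : List Int))).getD p (-1, []) = (-1, []) := PySem.Dict.getD_insert_self dB p (-1, []) (-1, [])
    have hnotin : ∀ q ∈ dA.items, q.1 ≠ p := by
      intro q hq hqp
      have : p ∈ dA.keys := by
        simp only [PySem.Dict.keys]
        exact List.mem_map.2 ⟨q, hq, hqp⟩
      have := (PySem.Dict.contains_iff_mem_keys dA p).2 this
      rw [hcp'] at this; exact Bool.false_ne_true this
    have hnotinB : ∀ q ∈ dB.items, q.1 ≠ p := by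
      intro q hq
      rw [h] at hq
      rcases List.mem_map.1 hq with ⟨q', hq', rfl⟩
      exact hnotin q' hq'
    -- A side: insert [] then append eid ⇒ items = dA.items ++ [(p, [eid])]
    have hA' : ((dA.insert p ([] : List Int)).modify p [] (fun l => l ++ [eid])).items
        = dA.items ++ [(p, [eid])] := by
      simp only [PySem.Dict.modify, hgA1]
      rw [PySem.Dict.items_insert_of_contains _ _ hcA1, hAins, List.map_append]
      congr 1
      · calc List.map (fun q => if (q.1 == p) = true then (p, [] ++ [eid]) else q) dA.items
            = List.map id dA.items := List.map_congr_left (by intro q hq; simp [hnotin q hq])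
          _ = dA.items := List.map_id _
      · simp
    -- value B stores at p after this step, by case on the experience lookup
    have hABfresh : ∀ (v : Int × List Int) (hv : v = pvF em [eid]),
        ((dB.insert p ((-1 : Int), ([] : List Int))).insert p v).items
          = (dA.items ++ [(p, [eid])]).map (pvG em) := by
      intro v hv
      rw [PySem.Dict.items_insert_of_contains _ _ hcB1, hBins, List.map_append, List.map_append, h, List.map_map]
      congr 1
      · apply List.map_congr_left
        intro q hq
        simp [Function.comp, pvG, hnotin q hq]
      · simp [pvG, hv]
    simp only [hcp', hcpB, Bool.false_eq_true, if_false]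
    cases he : em.get? eid with
    | none =>
      rw [hA', hBins, h, List.map_append]
      congr 1
      have : pvF em [eid] = ((-1 : Int), ([] : List Int)) := by
        have : pvF em ([] ++ [eid]) = pvF em [] := by rw [pvF_append, he]
        simpa [pvF, pvM, pvValEq] using this
      simp [pvG, this]
    | some e =>
      simp only [hgB1]
      have hstep : pvF em [eid] =
          (if e > (-1 : Int) then ((e : Int), [eid])
           else if e = (-1 : Int) then ((-1 : Int), ([] : List Int) ++ [eid])
           else ((-1 : Int), ([] : List Int))) := by
        have h0 : pvF em ([] : List Int) = ((-1 : Int), ([] : List Int)) := by simp [pvF, pvM]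
        have := pvF_append em [] eid
        rw [he] at this
        simpa [h0] using this
      by_cases hgt : e > (-1 : Int)
      · rw [if_pos hgt, hA']
        apply hABfresh
        rw [hstep]; simp [hgt]
      · by_cases heq : e = (-1 : Int)
        · rw [if_neg hgt, if_pos heq, hA']
          simp only [PySem.Dict.modify, hgB1]
          apply hABfresh
          rw [hstep]; simp [heq]
        · rw [if_neg hgt, if_neg heq, hA', hBins, h, List.map_append]
          congr 1
          simp only [pvG, List.map_cons, List.map_nil]
          rw [hstep]
          simp [hgt, heq]

-- Nodup of A's grouping dict is preserved by a step
lemma step_nodup (dA : PySem.Dict Int (List Int)) (hnd : dA.keys.Nodup) (p eid : Int) :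
    (((if dA.contains p then dA else dA.insert p []).modify p [] (fun l => l ++ [eid]))).keys.Nodup := by
  simp only [PySem.Dict.modify]
  apply PySem.Dict.nodup_keys_insert
  by_cases hcp : dA.contains p = true
  · simp only [hcp, if_true]; exact hnd
  · have hcp' : dA.contains p = false := by simpa using hcp
    simp only [hcp', Bool.false_eq_true, if_false]
    exact PySem.Dict.nodup_keys_insert dA p [] hnd

-- the grouping loops of A and B stay related over the whole input
lemma fold_rel (em : PySem.Dict Int Int) (pe : List (Int × Int))
    (dA : PySem.Dict Int (List Int)) (dB : PySem.Dict Int (Int × List Int))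
    (hnd : dA.keys.Nodup) (h : dB.items = dA.items.map (pvG em)) :
    (pe.foldl (fun d q =>
      let d := if d.contains q.1 then d else d.insert q.1 (-1, [])
      match em.get? q.2 with
      | none => d
      | some e =>
        let mc := d.getD q.1 (-1, [])
        if e > mc.1 then d.insert q.1 (e, [q.2])
        else if e = mc.1 then d.modify q.1 (-1, []) (fun q' => (q'.1, q'.2 ++ [q.2]))
        else d) dB).items
    = (pe.foldl (fun d q =>
      let d := if d.contains q.1 then d else d.insert q.1 []
      d.modify q.1 [] (fun l => l ++ [q.2])) dA).items.map (pvG em) := by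
  induction pe generalizing dA dB with
  | nil => simpa using h
  | cons q rest ih =>
    simp only [List.foldl_cons]
    apply ih
    · exact step_nodup dA hnd q.1 q.2
    · have := step_rel em dA dB hnd h q.1 q.2
      cases he : em.get? q.2 with
      | none => rw [he] at this; simpa using this
      | some e => rw [he] at this; simpa using this

-- the two result loops agree on related items lists
lemma results_eq (em : PySem.Dict Int Int) (itemsA : List (Int × List Int)) (acc : List (List (String × Int))) :
    (itemsA.map (pvG em)).foldl (fun results item =>
        if item.2.1 ≠ -1 then
          item.2.2.foldl (fun r eid => r ++ [[("project_id", item.1), ("employee_id", eid)]]) results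
        else results) acc
    = itemsA.foldl (fun results item =>
        let max_experience_for_project : Int :=
          item.2.foldl (fun m eid =>
            match em.get? eid with
            | some e => max m e
            | none => m) (-1)
        if max_experience_for_project ≠ -1 then
          item.2.foldl (fun r eid =>
            match em.get? eid with
            | some e => if e = max_experience_for_project then r ++ [[("project_id", item.1), ("employee_id", eid)]] else r
            | none => r) results
        else results) acc := by
  induction itemsA generalizing acc with
  | nil => rfl
  | cons q rest ih =>
    simp only [List.map_cons, List.foldl_cons]
    rw [ih]
    congr 1
    have hM : (pvF em q.2).1 = pvM em q.2 := rfl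
    have hM2 : (q.2.foldl (fun m eid =>
          match em.get? eid with
          | some e => max m e
          | none => m) (-1)) = pvM em q.2 := rfl
    simp only [pvG, hM, hM2]
    by_cases hne : pvM em q.2 ≠ -1
    · rw [if_pos hne, if_pos hne]
      have hA : q.2.foldl (fun r eid =>
            match em.get? eid with
            | some e => if e = pvM em q.2 then r ++ [[("project_id", q.1), ("employee_id", eid)]] else r
            | none => r) acc
          = q.2.foldl (fun r eid =>
            if pvValEq em (pvM em q.2) eid then r ++ [[("project_id", q.1), ("employee_id", eid)]] else r) acc := by
        have hfun : (fun (r : List (List (String × Int))) (eid : Int) =>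
              match em.get? eid with
              | some e => if e = pvM em q.2 then r ++ [[("project_id", q.1), ("employee_id", eid)]] else r
              | none => r)
            = (fun r eid =>
              if pvValEq em (pvM em q.2) eid then r ++ [[("project_id", q.1), ("employee_id", eid)]] else r) := by
          funext r eid
          cases he : em.get? eid with
          | none => simp [pvValEq, he]
          | some e =>
            by_cases heq : e = pvM em q.2 <;> simp [pvValEq, he, heq]
        rw [hfun]
      rw [hA, PySem.List.foldl_append_if, PySem.List.foldl_append_singleton_eq_map]
      rfl
    · rw [if_neg hne, if_neg hne]

-- ===== VERDICT (by name: the statement is the Claim_ definition above) =====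
theorem get_most_experienced_project_employees_spec : Claim_equal_get_most_experienced_project_employees := by
  intro employees_data project_employee_data _
  unfold Spec_get_most_experienced_project_employees
  unfold get_most_experienced_project_employees get_most_experienced_project_employees_alt
  simp only []
  set em : PySem.Dict Int Int := employees_data.foldl (fun d emp => d.insert emp.1 emp.2.2) PySem.Dict.empty with hem
  rw [← results_eq em]
  congr 1
  exact (fold_rel em project_employee_data PySem.Dict.empty PySem.Dict.empty (by simp) rfl).symm
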